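-- pv_equiv track=rewrite | github.com/TheFenrisLycaon/DSA-C-- | companies/Old/iAlwaysGetMyWay.py | countTotalWays
-- ===== SOURCE A (Python) =====
-- def countTotalWays(poolSize, bucketSize):
--     tempVar = 0
--     ways = [1]
--
--     for i in range(1, poolSize + 1):
--         s = i - bucketSize - 1
--         e = i - 1
--         if s >= 0:
--             tempVar -= ways[s]
--         tempVar += ways[e]
--         ways.append(tempVar)
--
--     return ways[poolSize]
-- ===== SOURCE B (Python) =====
-- def countTotalWays(poolSize, bucketSize):
--     ways = [1]
--     for i in range(1, poolSize + 1):
--         ways.append(sum(ways[max(0, i - bucketSize):i]))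
--     return ways[poolSize]
-- ===== Notes on version B (the rewrite author's own statement) =====
-- stated objective: simpler
-- what changed: B drops A's incremental tempVar running-sum (subtract the element leaving the window, add the one entering) and instead recomputes each new table entry by directly summing the clamped trailing slice ways[max(0, i - bucketSize):i].
import Mathlib
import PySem

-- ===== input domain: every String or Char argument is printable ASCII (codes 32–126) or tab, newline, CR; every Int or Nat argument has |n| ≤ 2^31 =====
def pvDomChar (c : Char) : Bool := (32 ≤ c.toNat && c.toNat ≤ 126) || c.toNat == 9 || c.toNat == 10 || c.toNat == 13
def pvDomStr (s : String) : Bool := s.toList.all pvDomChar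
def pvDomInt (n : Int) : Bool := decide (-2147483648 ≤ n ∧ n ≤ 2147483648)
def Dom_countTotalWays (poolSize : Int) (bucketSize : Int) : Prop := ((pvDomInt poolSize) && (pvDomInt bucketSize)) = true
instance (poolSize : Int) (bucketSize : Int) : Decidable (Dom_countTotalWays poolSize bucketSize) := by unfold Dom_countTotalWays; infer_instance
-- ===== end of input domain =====

-- B replaces A's incremental running-sum update by directly summing the clamped trailing window each step (simpler; not faster).

-- ===== PORT A =====
-- loop body of A, extracted as a helper: state = (tempVar, ways)
def stepA (bucketSize : Int) (st : Int × List Int) (i : Int) : Int × List Int :=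
  let s := i - bucketSize - 1
  let e := i - 1
  let t1 := if s ≥ 0 then st.1 - PySem.List.pyGetD st.2 s 0 else st.1
  let t2 := t1 + PySem.List.pyGetD st.2 e 0
  (t2, st.2 ++ [t2])

def countTotalWays (poolSize : Int) (bucketSize : Int) : Int :=
  let st := (PySem.List.pyRange 1 (poolSize + 1) 1).foldl (stepA bucketSize) (0, [1])
  PySem.List.pyGetD st.2 poolSize 0

-- ===== PORT B =====
-- loop body of B: append the sum of the clamped trailing slice ways[max(0, i - bucketSize):i]
def stepB (bucketSize : Int) (w : List Int) (i : Int) : List Int :=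
  w ++ [(PySem.List.slice w (some (max 0 (i - bucketSize))) (some i)).sum]

def countTotalWays_alt (poolSize : Int) (bucketSize : Int) : Int :=
  let ways := (PySem.List.pyRange 1 (poolSize + 1) 1).foldl (stepB bucketSize) [1]
  PySem.List.pyGetD ways poolSize 0

-- ===== PRECONDITION & SPEC =====
-- Pre_ excludes exactly the inputs on which A raises IndexError: poolSize ≤ -2 (ways[poolSize]
-- out of range), and poolSize ≥ 1 with bucketSize < 0 (ways[i - bucketSize - 1] past the end).
def Pre_countTotalWays (poolSize : Int) (bucketSize : Int) : Prop :=
  -1 ≤ poolSize ∧ (0 ≤ bucketSize ∨ poolSize ≤ 0)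
instance (poolSize : Int) (bucketSize : Int) : Decidable (Pre_countTotalWays poolSize bucketSize) := by
  unfold Pre_countTotalWays; infer_instance

def pvWitness_countTotalWays : Int × Int := (5, 3)

def Spec_countTotalWays (poolSize : Int) (bucketSize : Int) (out : Int) : Prop :=
  out = countTotalWays_alt poolSize bucketSize
instance (poolSize : Int) (bucketSize : Int) (out : Int) : Decidable (Spec_countTotalWays poolSize bucketSize out) := by
  unfold Spec_countTotalWays; infer_instance

-- ===== CLAIM (what is proved, stated in full; the proofs are below) =====
def Claim_equal_countTotalWays : Prop := ∀ (poolSize : Int) (bucketSize : Int), Dom_countTotalWays poolSize bucketSize → Pre_countTotalWays poolSize bucketSize → Spec_countTotalWays poolSize bucketSize (countTotalWays poolSize bucketSize)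

-- ===== LEMMAS AND PROOFS =====

-- Nat-indexed versions of the two loops (n = number of completed iterations)
def wB (b : Int) : Nat → List Int
  | 0 => [1]
  | n + 1 => stepB b (wB b n) ((n : Int) + 1)

def stA (b : Int) : Nat → Int × List Int
  | 0 => (0, [1])
  | n + 1 => stepA b (stA b n) ((n : Int) + 1)

theorem foldA_eq (b : Int) (n : Nat) :
    (PySem.List.pyRange 1 ((n : Int) + 1) 1).foldl (stepA b) (0, [1]) = stA b n := by
  induction n with
  | zero => simp [PySem.List.pyRange_one_eq_nil, stA]
  | succ n ih =>
      push_cast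
      rw [PySem.List.pyRange_one_succ_right (by omega : (1:Int) ≤ (n : Int) + 1)]
      simp [List.foldl_append, ih, stA]

theorem foldB_eq (b : Int) (n : Nat) :
    (PySem.List.pyRange 1 ((n : Int) + 1) 1).foldl (stepB b) [1] = wB b n := by
  induction n with
  | zero => simp [PySem.List.pyRange_one_eq_nil, wB]
  | succ n ih =>
      push_cast
      rw [PySem.List.pyRange_one_succ_right (by omega : (1:Int) ≤ (n : Int) + 1)]
      simp [List.foldl_append, ih, wB]

theorem length_wB (b : Int) (n : Nat) : (wB b n).length = n + 1 := by
  induction n with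
  | zero => rfl
  | succ n ih => simp [wB, stepB, ih]

-- invariant: the A-state after n iterations is B's table together with
-- tempVar = S(n) - S(m), S(k) = (w.take k).sum, m = (max 0 (n - b)).toNat
theorem invariant (b : Int) (hb : 0 ≤ b) (n : Nat) :
    stA b n = (((wB b n).take n).sum - ((wB b n).take (max 0 ((n : Int) - b)).toNat).sum,
               wB b n) := by
  induction n with
  | zero =>
      have h0 : (max 0 (-b)).toNat = 0 := by omega
      simp [stA, wB, h0]
  | succ n ih =>
      set w := wB b n with hw
      have hlen : w.length = n + 1 := length_wB b n
      set m : Nat := (max 0 ((n : Int) - b)).toNat with hm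
      set m' : Nat := (max 0 (((n : Nat) + 1 : Int) - b)).toNat with hm'
      have hmn : m ≤ n := by omega
      have hm'n : m' ≤ n + 1 := by omega
      -- the value B appends at step n+1 equals w.sum - (w.take m').sum
      have happ : (PySem.List.slice w (some (max 0 (((n : Nat) + 1 : Int) - b))) (some ((n : Nat) + 1 : Int))).sum
                    = w.sum - (w.take m').sum := by
        have h0 : (0 : Int) ≤ max 0 (((n : Nat) + 1 : Int) - b) := le_max_left _ _
        rw [PySem.List.slice_toNat _ h0 (by positivity)]
        have htake : ((w.drop m').take (((n : Nat) + 1 : Int).toNat - m')) = w.drop m' := by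
          apply List.take_of_length_le
          simp only [List.length_drop, hlen]
          omega
        rw [htake]
        have := List.sum_take_add_sum_drop w m'
        omega
      -- tempVar update
      have hwn : (w.take (n+1)).sum = w.sum := by
        rw [List.take_of_length_le (by omega)]
      -- unfold one step of both
      show stepA b (stA b n) ((n : Int) + 1)
            = (((wB b (n+1)).take (n+1)).sum - ((wB b (n+1)).take m').sum, wB b (n+1))
      rw [ih]
      have hBstep : wB b (n+1) = w ++ [w.sum - (w.take m').sum] := by
        simp [wB, stepB, ← hw, happ]
      have hval : ∀ v : Int, ((w ++ [v]).take (n+1)).sum - ((w ++ [v]).take m').sum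
                   = w.sum - (w.take m').sum := by
        intro v
        rw [List.take_append_of_le_length (by omega), List.take_append_of_le_length (by omega),
            List.take_of_length_le (by omega)]
      -- compute the A step
      unfold stepA
      simp only []
      have hgetE : PySem.List.pyGetD w ((n : Int) + 1 - 1) 0 = w[n]'(by omega) := by
        have : ((n : Int) + 1 - 1) = ((n : Nat) : Int) := by ring
        rw [this, PySem.List.pyGetD_natCast]
        simp [List.getD, List.getElem?_eq_getElem (by omega : n < w.length)]
      by_cases hcase : (n : Int) + 1 - b - 1 ≥ 0
      · -- b ≤ n : element w[m] leaves the window, m' = m + 1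
        have hbn : b.toNat ≤ n := by omega
        have hmm : m = n - b.toNat := by omega
        have hm'm : m' = m + 1 := by omega
        have hsE : ((n : Int) + 1 - b - 1) = ((m : Nat) : Int) := by
          simp [hmm]; omega
        have hgetS : PySem.List.pyGetD w ((n : Int) + 1 - b - 1) 0 = w[m]'(by omega) := by
          rw [hsE, PySem.List.pyGetD_natCast]
          simp [List.getD, List.getElem?_eq_getElem (by omega : m < w.length)]
        rw [if_pos hcase, hgetS, hgetE, hBstep, hval]
        have h1 := List.sum_take_succ w n (by omega)
        have h2 := List.sum_take_succ w m (by omega)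
        have hA : (w.take n).sum - (w.take m).sum - w[m]'(by omega) + w[n]'(by omega)
                    = w.sum - (w.take m').sum := by
          rw [hm'm]
          simp only [hwn] at h1
          omega
        rw [hA]
      · -- n < b : nothing leaves, m = m' = 0
        have hmm : m = 0 := by omega
        have hm'm : m' = 0 := by omega
        rw [if_neg hcase, hgetE, hBstep, hval]
        have h1 := List.sum_take_succ w n (by omega)
        have hA : (w.take n).sum - (w.take m).sum + w[n]'(by omega)
                    = w.sum - (w.take m').sum := by
          rw [hmm, hm'm]
          simp only [hwn] at h1
          simp only [List.take_zero, List.sum_nil]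
          omega
        rw [hA]

-- ===== VERDICT (by name: the statement is the Claim_ definition above) =====
theorem countTotalWays_spec : Claim_equal_countTotalWays := by
  intro ps b _hdom hpre
  unfold Spec_countTotalWays countTotalWays countTotalWays_alt
  rcases hpre with ⟨hge, hcase⟩
  by_cases hps : ps ≤ 0
  · -- loop body never runs: both tables are [1]
    rw [PySem.List.pyRange_one_eq_nil (by omega)]
    simp
  · -- ps ≥ 1, hence 0 ≤ b
    have hb : 0 ≤ b := by rcases hcase with h | h <;> omega
    have hn : ps = ((ps.toNat : Nat) : Int) := by omega
    rw [hn, foldA_eq, foldB_eq, invariant b hb]
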